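-- pv_equiv track=rewrite | github.com/ASSERT-KTH/Mokav | experiments/c4b/BADTI/iteration-10-sample-1-temp-0/generated_tests/2810/104306/temp_acc_qb.py | patched_func
-- ===== SOURCE A (Python) =====
-- def patched_func(*args):
-- 	global_list = []
--
-- 	n = int(args[0])
-- 	visitedschools = []
-- 	c = 0
-- 	i = 1
-- 	visitedschools += [i]
-- 	j = 1
-- 	while (len(visitedschools) < n):
-- 	    k = ((n + j) - i)
-- 	    j = (2 if (j == 1) else 1)
-- 	    visitedschools += [k]
-- 	    c += ((k + i) % (n + 1))
-- 	global_list.append(c)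
-- 	return global_list
-- ===== SOURCE B (Python) =====
-- def patched_func(*args):
--     # Closed form: the loop adds (n+j) % (n+1) over n-1 iterations with j
--     # alternating 1,2,..., so c = floor((n-1)/2) for n >= 1 and 0 otherwise.
--     n = int(args[0])
--     return [(n - 1) // 2 if n >= 1 else 0]
-- ===== Notes on version B (the rewrite author's own statement) =====
-- stated objective: faster
-- what changed: Replaced the O(n) while-loop that builds a visited list and accumulates alternating modular terms with the closed form floor((n-1)/2) (0 for n<1).
import Mathlib
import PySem

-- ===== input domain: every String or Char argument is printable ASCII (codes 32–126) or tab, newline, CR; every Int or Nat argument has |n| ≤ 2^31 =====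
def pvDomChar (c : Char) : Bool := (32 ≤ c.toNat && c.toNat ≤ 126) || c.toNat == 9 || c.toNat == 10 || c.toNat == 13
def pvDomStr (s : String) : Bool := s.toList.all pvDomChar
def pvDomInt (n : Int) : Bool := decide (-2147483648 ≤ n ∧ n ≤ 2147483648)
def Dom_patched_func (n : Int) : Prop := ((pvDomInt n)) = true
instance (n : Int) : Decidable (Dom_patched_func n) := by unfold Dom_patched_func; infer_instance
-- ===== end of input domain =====

-- B replaces A's O(n) while-loop with the closed form floor((n-1)/2) (0 for n < 1).

-- ===== PORT A =====
-- A's while loop: state (visitedschools, c, i, j); appends k and accumulates (k+i)%(n+1).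
def patched_funcLoop (n : Int) (visitedschools : List Int) (c i j : Int) : Int :=
  if _h : (visitedschools.length : Int) < n then
    let k := (n + j) - i
    let j' : Int := if j = 1 then 2 else 1
    patched_funcLoop n (visitedschools ++ [k]) (c + PySem.Int.mod (k + i) (n + 1)) i j'
  else c
termination_by (n - visitedschools.length).toNat
decreasing_by simp; omega

def patched_func (n : Int) : List Int :=
  let visitedschools : List Int := []
  let c : Int := 0
  let i : Int := 1
  let visitedschools := visitedschools ++ [i]
  let j : Int := 1
  [patched_funcLoop n visitedschools c i j]

-- ===== PORT B =====
def patched_func_alt (n : Int) : List Int :=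
  [if 1 ≤ n then PySem.Int.floordiv (n - 1) 2 else 0]

-- ===== PRECONDITION & SPEC =====
def Spec_patched_func (n : Int) (out : List Int) : Prop := out = patched_func_alt n
instance (n : Int) (out : List Int) : Decidable (Spec_patched_func n out) := by unfold Spec_patched_func; infer_instance

-- ===== CLAIM (what is proved, stated in full; the proofs are below) =====
def Claim_equal_patched_func : Prop := ∀ (n : Int), Dom_patched_func n → Spec_patched_func n (patched_func n)

-- ===== LEMMAS AND PROOFS =====

-- Loop invariant: with i = 1 and j ∈ {1,2}, after t = (n - len).toNat remaining iterations
-- the loop returns c plus the number of iterations executed with j = 2.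
theorem patched_funcLoop_eq (t : Nat) : ∀ (n : Int) (vs : List Int) (c j : Int),
    (n - vs.length).toNat = t → (j = 1 ∨ j = 2) →
    patched_funcLoop n vs c 1 j =
      c + (if j = 1 then ((t / 2 : Nat) : Int) else (((t + 1) / 2 : Nat) : Int)) := by
  induction t with
  | zero =>
    intro n vs c j ht hj
    rw [patched_funcLoop]
    have hnl : ¬ ((vs.length : Int) < n) := by omega
    rcases hj with hj | hj <;> simp [hnl, hj]
  | succ t ih =>
    intro n vs c j ht hj
    have hlt : (vs.length : Int) < n := by omega
    rw [patched_funcLoop]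
    simp only [hlt, dif_pos]
    rcases hj with hj | hj
    · subst hj
      norm_num
      have hmod : PySem.Int.mod (n + 1) (n + 1) = 0 := by
        rw [PySem.Int.mod_eq_emod_of_pos (by omega)]; simp
      rw [hmod, add_zero]
      exact ih n (vs ++ [n]) c 2 (by simp; omega) (Or.inr rfl)
    · subst hj
      norm_num
      have hmod : PySem.Int.mod (n + 2) (n + 1) = 1 := by
        rw [PySem.Int.mod_eq_emod_of_pos (by omega),
            show (n + 2 : Int) = 1 + (n + 1) * 1 from by ring, Int.add_mul_emod_self_left]
        exact Int.emod_eq_of_lt (by omega) (by omega)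
      rw [hmod, show (n + 2 - 1 : Int) = n + 1 from by ring]
      rw [ih n (vs ++ [n + 1]) (c + 1) 1 (by simp; omega) (Or.inl rfl)]
      norm_num
      omega

-- ===== VERDICT (by name: the statement is the Claim_ definition above) =====
theorem patched_func_spec : Claim_equal_patched_func := by
  intro n _
  unfold Spec_patched_func patched_func patched_func_alt
  have h := patched_funcLoop_eq ((n - 1).toNat) n ([] ++ [(1:Int)]) 0 1 (by simp) (Or.inl rfl)
  simp only [zero_add, if_pos] at h
  simp only [h]
  by_cases hn : 1 ≤ n
  · have hfd : PySem.Int.floordiv (n - 1) 2 = (n - 1) / 2 :=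
      PySem.Int.floordiv_eq_ediv_of_pos (by omega)
    simp only [if_pos hn, hfd]
    have : ((n - 1).toNat : Int) = n - 1 := by omega
    have h2 : (((n - 1).toNat / 2 : Nat) : Int) = ((n - 1).toNat : Int) / 2 := by
      omega
    rw [h2, this]
  · have : (n - 1).toNat = 0 := by omega
    simp [this, hn]
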